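-- pv_equiv track=rewrite | github.com/ddsuhaimi/Bootcamp-Arkademy-Batch-13 | nomor3.py | divideAndSort
-- ===== SOURCE A (Python) =====
-- def divideAndSort(number):
--     portions = str(number).split('0')
--     sorted_portions = []
--     for portion in portions:
--         digit = [int(i) for i in portion]
--         digit.sort()
--         sorted_portions.append(digit)
--
--     sorted_digit = []
--     for i in sorted_portions:
--         for j in i:
--             sorted_digit.append(j)
--
--     result = ''.join([str(x) for x in sorted_digit])
--     return int(result)
-- ===== SOURCE B (Python) =====
-- def divideAndSort(number):
--     pieces = []
--     for portion in str(number).split('0'):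
--         counts = {}
--         for ch in portion:
--             d = int(ch)
--             counts[d] = counts.get(d, 0) + 1
--         pieces.append(''.join(str(d) * counts.get(d, 0) for d in range(10)))
--     return int(''.join(pieces))
-- ===== Notes on version B (the rewrite author's own statement) =====
-- stated objective: alternative
-- what changed: Replaces the per-portion comparison sort (build int list, list.sort, flatten, re-stringify) with a counting sort: a dict tallies each digit of the portion and the sorted portion is emitted directly as str(d)*count for d in 0..9.
import Mathlib
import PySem

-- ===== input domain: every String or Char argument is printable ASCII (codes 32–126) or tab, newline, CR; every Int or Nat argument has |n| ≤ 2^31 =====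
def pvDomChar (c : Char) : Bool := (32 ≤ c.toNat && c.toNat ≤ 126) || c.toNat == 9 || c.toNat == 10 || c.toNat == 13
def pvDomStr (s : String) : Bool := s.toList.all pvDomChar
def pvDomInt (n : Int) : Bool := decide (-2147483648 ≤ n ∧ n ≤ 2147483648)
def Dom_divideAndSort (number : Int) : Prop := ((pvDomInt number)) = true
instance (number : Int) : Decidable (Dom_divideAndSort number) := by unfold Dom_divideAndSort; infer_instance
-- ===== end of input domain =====

-- B replaces A's per-portion comparison sort with a counting sort (tally each digit in a dict,
-- emit str(d)*count for d = 0..9): a different algorithm of similar cost ("alternative").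

-- ===== PORT A =====
def divideAndSort (number : Int) : Int :=
  let portions := PySem.Chars.splitOn (PySem.Int.toChars number) ['0']
  let sorted_portions := portions.foldl (fun acc portion =>
    acc ++ [PySem.List.sorted (portion.map (fun i => (PySem.Int.ofChars? [i]).getD 0)) (fun x => x) false]) []
  let sorted_digit := sorted_portions.foldl (fun acc i => i.foldl (fun a j => a ++ [j]) acc) []
  let result := PySem.Chars.join [] (sorted_digit.map (fun x => PySem.Int.toChars x))
  (PySem.Int.ofChars? result).getD 0

-- ===== PORT B =====
def divideAndSort_alt (number : Int) : Int :=
  let pieces := (PySem.Chars.splitOn (PySem.Int.toChars number) ['0']).foldl (fun acc portion =>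
    let counts := portion.foldl (fun dd ch =>
        let d := (PySem.Int.ofChars? [ch]).getD 0
        dd.insert d (dd.getD d 0 + 1)) (PySem.Dict.empty : PySem.Dict Int Int)
    acc ++ [PySem.Chars.join [] ((PySem.List.pyRange 0 10 1).map (fun d =>
        PySem.List.pyRepeat (PySem.Int.toChars d) (counts.getD d 0)))]) []
  (PySem.Int.ofChars? (PySem.Chars.join [] pieces)).getD 0

-- ===== PRECONDITION & SPEC =====
-- Pre_ excludes exactly the nonpositive inputs, on which A raises ValueError (the sign character
-- fails int(), and for zero every portion is empty so the final int() gets an empty string).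
def Pre_divideAndSort (number : Int) : Prop := 1 ≤ number
instance (number : Int) : Decidable (Pre_divideAndSort number) := by unfold Pre_divideAndSort; infer_instance
def pvWitness_divideAndSort : Int := (102)
def Spec_divideAndSort (number : Int) (out : Int) : Prop := out = divideAndSort_alt number
instance (number : Int) (out : Int) : Decidable (Spec_divideAndSort number out) := by unfold Spec_divideAndSort; infer_instance

-- ===== CLAIM (what is proved, stated in full; the proofs are below) =====
def Claim_equal_divideAndSort : Prop := ∀ (number : Int), Dom_divideAndSort number → Pre_divideAndSort number → Spec_divideAndSort number (divideAndSort number)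

-- ===== LEMMAS AND PROOFS =====
def pvDigits : List Char := ['0','1','2','3','4','5','6','7','8','9']
def pvRange10 : List Int := [0,1,2,3,4,5,6,7,8,9]

lemma mem_toDigitsCore10 : ∀ (f n : Nat) (acc : List Char) (c : Char),
    c ∈ Nat.toDigitsCore 10 f n acc → c ∈ acc ∨ c ∈ pvDigits := by
  intro f
  induction f with
  | zero => intro n acc c h; simp [Nat.toDigitsCore] at h; exact Or.inl h
  | succ f ih =>
    intro n acc c h
    have hd : (n % 10).digitChar ∈ pvDigits := by
      have : n % 10 < 10 := Nat.mod_lt _ (by norm_num)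
      interval_cases h : n % 10 <;> simp [Nat.digitChar, pvDigits]
    simp only [Nat.toDigitsCore] at h
    split at h
    · rcases List.mem_cons.mp h with h | h
      · exact Or.inr (h ▸ hd)
      · exact Or.inl h
    · rcases ih _ _ _ h with h | h
      · rcases List.mem_cons.mp h with h | h
        · exact Or.inr (h ▸ hd)
        · exact Or.inl h
      · exact Or.inr h

lemma digit_toChars {n : Int} (hn : 0 ≤ n) : ∀ c ∈ PySem.Int.toChars n, c ∈ pvDigits := by
  intro c hc
  unfold PySem.Int.toChars at hc
  rw [if_neg (by omega)] at hc
  rcases mem_toDigitsCore10 _ _ _ _ hc with h | h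
  · simp at h
  · exact h

lemma splitOn_go_chars (sep : List Char) : ∀ (fuel : Nat) (l cur : List Char)
    (acc : List (List Char)) (p : List Char), p ∈ PySem.Chars.splitOn.go sep fuel l cur acc →
    ∀ c ∈ p, c ∈ l ∨ c ∈ cur ∨ ∃ q ∈ acc, c ∈ q := by
  intro fuel
  induction fuel with
  | zero =>
    intro l cur acc p hp c hc
    simp [PySem.Chars.splitOn.go] at hp
    rcases hp with h | h
    · exact Or.inr (Or.inr ⟨p, h, hc⟩)
    · subst h; rcases List.mem_append.mp hc with h | h
      · exact Or.inr (Or.inl (List.mem_reverse.mp h))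
      · exact Or.inl h
  | succ fuel ih =>
    intro l cur acc p hp c hc
    cases l with
    | nil =>
      simp [PySem.Chars.splitOn.go] at hp
      rcases hp with h | h
      · exact Or.inr (Or.inr ⟨p, h, hc⟩)
      · subst h; exact Or.inr (Or.inl (List.mem_reverse.mp hc))
    | cons a rest =>
      simp only [PySem.Chars.splitOn.go] at hp
      split at hp
      · rcases ih _ _ _ _ hp c hc with h | h | ⟨q, hq, hcq⟩
        · exact Or.inl (List.mem_of_mem_drop h)
        · simp at h
        · rcases List.mem_cons.mp hq with h | h
          · subst h; exact Or.inr (Or.inl (List.mem_reverse.mp hcq))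
          · exact Or.inr (Or.inr ⟨q, h, hcq⟩)
      · rcases ih _ _ _ _ hp c hc with h | h | ⟨q, hq, hcq⟩
        · exact Or.inl (List.mem_cons_of_mem _ h)
        · rcases List.mem_cons.mp h with h | h
          · exact Or.inl (h ▸ List.mem_cons_self)
          · exact Or.inr (Or.inl h)
        · exact Or.inr (Or.inr ⟨q, hq, hcq⟩)

lemma splitOn_chars (s sep : List Char) (p : List Char)
    (hp : p ∈ PySem.Chars.splitOn s sep) : ∀ c ∈ p, c ∈ s := by
  intro c hc
  rcases splitOn_go_chars sep _ _ _ _ _ hp c hc with h | h | ⟨q, hq, hcq⟩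
  · exact h
  · simp at h
  · simp at hq

lemma count_flatMap_replicate (xs : List Int) : ∀ (ds : List Int), ds.Nodup → ∀ (a : Int),
    (ds.flatMap (fun d => List.replicate (xs.count d) d)).count a
      = if a ∈ ds then xs.count a else 0 := by
  intro ds
  induction ds with
  | nil => simp
  | cons d ds ih =>
    intro hnd a
    have hnd' := (List.nodup_cons.mp hnd).2
    have hdn := (List.nodup_cons.mp hnd).1
    simp only [List.flatMap_cons, List.count_append, ih hnd']
    by_cases had : a = d
    · subst had
      rw [List.count_replicate_self, if_neg hdn, if_pos List.mem_cons_self]; ring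
    · rw [List.count_replicate, if_neg (by exact fun h => had (by simp_all))]
      by_cases hmem : a ∈ ds
      · rw [if_pos hmem, if_pos (List.mem_cons_of_mem _ hmem)]; ring
      · rw [if_neg hmem, if_neg (by simp [had, hmem])]

lemma perm_flatMap_replicate (xs ds : List Int) (hnd : ds.Nodup)
    (hx : ∀ x ∈ xs, x ∈ ds) :
    (ds.flatMap (fun d => List.replicate (xs.count d) d)).Perm xs := by
  rw [List.perm_iff_count]
  intro a
  rw [count_flatMap_replicate xs ds hnd a]
  by_cases h : a ∈ ds
  · simp [h]
  · rw [if_neg h, eq_comm, List.count_eq_zero]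
    exact fun ha => h (hx a ha)

lemma pairwise_flatMap_replicate (n : Int → Nat) : ∀ (ds : List Int), ds.Pairwise (· < ·) →
    (ds.flatMap (fun d => List.replicate (n d) d)).Pairwise (· ≤ ·) := by
  intro ds
  induction ds with
  | nil => simp
  | cons d ds ih =>
    intro hp
    rw [List.pairwise_cons] at hp
    simp only [List.flatMap_cons]
    rw [List.pairwise_append]
    refine ⟨List.pairwise_replicate.mpr (Or.inr le_rfl), ih hp.2, ?_⟩
    intro a ha b hb
    rcases List.mem_flatMap.mp hb with ⟨e, he, hbe⟩
    rw [List.eq_of_mem_replicate ha, List.eq_of_mem_replicate hbe]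
    exact le_of_lt (hp.1 e he)

lemma sorted_eq_counting (xs : List Int) (hx : ∀ x ∈ xs, x ∈ pvRange10) :
    PySem.List.sorted xs (fun x => x) false
      = pvRange10.flatMap (fun d => List.replicate (xs.count d) d) :=
  PySem.List.sorted_id_eq_of_perm_of_pairwise _ _
    (perm_flatMap_replicate xs _ (by decide) hx)
    (pairwise_flatMap_replicate _ _ (by decide))

lemma flatten_map_toChars_flatMap (n : Int → Nat) : ∀ (ds : List Int),
    ((ds.flatMap (fun d => List.replicate (n d) d)).map PySem.Int.toChars).flatten
      = (ds.map (fun d => PySem.List.pyRepeat (PySem.Int.toChars d) ((n d : Nat) : Int))).flatten := by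
  intro ds
  induction ds with
  | nil => simp
  | cons d ds ih =>
    simp only [List.flatMap_cons, List.map_cons, List.map_append, List.flatten_append,
      List.flatten_cons, ih, List.map_replicate]
    congr 1

lemma join_nil_eq_flatten : ∀ (parts : List (List Char)),
    PySem.Chars.join [] parts = parts.flatten := by
  intro parts
  induction parts with
  | nil => simp [PySem.Chars.join, List.intercalate]
  | cons p ps ih =>
    cases ps with
    | nil => simp [PySem.Chars.join, List.intercalate]
    | cons q qs =>
      simp only [PySem.Chars.join, List.intercalate, List.intersperse] at ih ⊢
      simp [ih]

lemma foldl_append_elem {α : Type} : ∀ (l acc : List α),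
    l.foldl (fun a j => a ++ [j]) acc = acc ++ l := by
  intro l
  induction l with
  | nil => simp
  | cons x xs ih => intro acc; simp [List.foldl_cons, ih]

lemma foldl_append_singleton {α β : Type} (f : α → List β) : ∀ (l : List α) (acc : List (List β)),
    l.foldl (fun a x => a ++ [f x]) acc = acc ++ l.map f := by
  intro l
  induction l with
  | nil => simp
  | cons x xs ih => intro acc; simp [List.foldl_cons, ih]

lemma foldl_flatten {α : Type} : ∀ (L : List (List α)) (acc : List α),
    L.foldl (fun acc i => i.foldl (fun a j => a ++ [j]) acc) acc = acc ++ L.flatten := by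
  intro L
  induction L with
  | nil => simp
  | cons p ps ih =>
    intro acc
    rw [List.foldl_cons, foldl_append_elem, ih, List.flatten_cons, List.append_assoc]

lemma getD_foldl_insert_val (val : Char → Int) : ∀ (p : List Char) (dd : PySem.Dict Int Int) (d : Int),
    (p.foldl (fun dd ch => dd.insert (val ch) (dd.getD (val ch) 0 + 1)) dd).getD d 0
      = dd.getD d 0 + (((p.map val).count d : Nat) : Int) := by
  intro p
  induction p with
  | nil => simp
  | cons c p ih =>
    intro dd d
    rw [List.foldl_cons, ih, PySem.Dict.getD_insert, List.map_cons, List.count_cons]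
    by_cases h : d = val c
    · rw [if_pos h, if_pos (by simp [h]), h]; push_cast; ring
    · rw [if_neg h, if_neg (by simp [Ne.symm h])]; push_cast; ring

lemma seg_eq (p : List Char) (hp : ∀ c ∈ p, c ∈ pvDigits) :
    ((PySem.List.sorted (p.map (fun i => (PySem.Int.ofChars? [i]).getD 0)) (fun x => x) false).map
        PySem.Int.toChars).flatten
      = PySem.Chars.join [] ((PySem.List.pyRange 0 10 1).map (fun d =>
          PySem.List.pyRepeat (PySem.Int.toChars d)
            ((p.foldl (fun dd ch =>
                dd.insert ((PySem.Int.ofChars? [ch]).getD 0)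
                  (dd.getD ((PySem.Int.ofChars? [ch]).getD 0) 0 + 1))
              (PySem.Dict.empty : PySem.Dict Int Int)).getD d 0))) := by
  have hx : ∀ x ∈ p.map (fun i => (PySem.Int.ofChars? [i]).getD 0), x ∈ pvRange10 := by
    intro x hx
    rcases List.mem_map.mp hx with ⟨c, hc, rfl⟩
    have h := hp c hc
    fin_cases h <;> decide
  have hcounts : ∀ d : Int,
      (p.foldl (fun dd ch =>
          dd.insert ((PySem.Int.ofChars? [ch]).getD 0)
            (dd.getD ((PySem.Int.ofChars? [ch]).getD 0) 0 + 1))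
        (PySem.Dict.empty : PySem.Dict Int Int)).getD d 0
      = (((p.map (fun i => (PySem.Int.ofChars? [i]).getD 0)).count d : Nat) : Int) := by
    intro d
    rw [getD_foldl_insert_val, PySem.Dict.getD_empty, zero_add]
  simp only [hcounts]
  rw [sorted_eq_counting _ hx, join_nil_eq_flatten,
    show PySem.List.pyRange 0 10 1 = pvRange10 from by decide]
  exact flatten_map_toChars_flatMap (fun d => (p.map (fun i => (PySem.Int.ofChars? [i]).getD 0)).count d) pvRange10

lemma chars_eq : ∀ (ps : List (List Char)), (∀ p ∈ ps, ∀ c ∈ p, c ∈ pvDigits) →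
    (((ps.map (fun portion =>
        PySem.List.sorted (portion.map (fun i => (PySem.Int.ofChars? [i]).getD 0)) (fun x => x) false)).flatten).map
      PySem.Int.toChars).flatten
    = (ps.map (fun portion =>
        PySem.Chars.join [] ((PySem.List.pyRange 0 10 1).map (fun d =>
          PySem.List.pyRepeat (PySem.Int.toChars d)
            ((portion.foldl (fun dd ch =>
                dd.insert ((PySem.Int.ofChars? [ch]).getD 0)
                  (dd.getD ((PySem.Int.ofChars? [ch]).getD 0) 0 + 1))
              (PySem.Dict.empty : PySem.Dict Int Int)).getD d 0))))).flatten := by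
  intro ps
  induction ps with
  | nil => simp
  | cons p ps ih =>
    intro h
    simp only [List.map_cons, List.flatten_cons, List.map_append, List.flatten_append]
    rw [ih (fun q hq => h q (List.mem_cons_of_mem _ hq)),
      seg_eq p (h p List.mem_cons_self)]

-- ===== VERDICT (by name: the statement is the Claim_ definition above) =====
theorem divideAndSort_spec : Claim_equal_divideAndSort := by
  intro number _ hpre
  unfold Spec_divideAndSort divideAndSort divideAndSort_alt
  simp only [foldl_append_singleton, foldl_flatten, List.nil_append]
  have hdig : ∀ p ∈ PySem.Chars.splitOn (PySem.Int.toChars number) ['0'], ∀ c ∈ p, c ∈ pvDigits :=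
    fun p hp c hc =>
      digit_toChars (by exact le_trans (by norm_num) hpre) c (splitOn_chars _ _ p hp c hc)
  rw [join_nil_eq_flatten, join_nil_eq_flatten, chars_eq _ hdig]
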